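-- pv_equiv track=rewrite | github.com/r-jelly/program-solving | baekjoon/14717.py | win_or_lose
-- ===== SOURCE A (Python) =====
-- from itertools import combinations
--
-- def win_or_lose(is_same: bool, num: int, remain):
--     win, not_win = 0, 0
--     combin = combinations(remain, 2)
--     for i, j in combin:
--         if is_same:
--             if i != j:
--                 win += 1
--             else:
--                 if i < num:
--                     win += 1
--                 else:
--                     not_win += 1
--         else:
--             if i == j:
--                 not_win += 1
--             else:
--                 if (i+j)%10 >= num:
--                     not_win += 1
--                 else:
--                     win += 1
--     return win, not_win
-- ===== SOURCE B (Python) =====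
-- def win_or_lose(is_same, num, remain):
--     # One pass: stream elements, pair each new element against a running
--     # counter and a mod-10 residue histogram of previous elements (O(n) vs O(n^2)).
--     win, not_win = 0, 0
--     cnt = {}
--     hist = [0] * 10
--     seen = 0
--     for y in remain:
--         c = cnt.get(y, 0)
--         if is_same:
--             win += seen - c
--             if y < num:
--                 win += c
--             else:
--                 not_win += c
--         else:
--             s = sum(hist[d] for d in range(10) if (d + y % 10) % 10 >= num)
--             bad = s - (c if (2 * y) % 10 >= num else 0)
--             not_win += c + bad
--             win += (seen - c) - bad
--         cnt[y] = c + 1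
--         hist[y % 10] += 1
--         seen += 1
--     return win, not_win
-- ===== Notes on version B (the rewrite author's own statement) =====
-- stated objective: faster
-- what changed: Replaces the O(n^2) scan over all combinations(remain,2) by a single pass that pairs each element against a running value counter and a mod-10 residue histogram of the elements seen so far.
import Mathlib
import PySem

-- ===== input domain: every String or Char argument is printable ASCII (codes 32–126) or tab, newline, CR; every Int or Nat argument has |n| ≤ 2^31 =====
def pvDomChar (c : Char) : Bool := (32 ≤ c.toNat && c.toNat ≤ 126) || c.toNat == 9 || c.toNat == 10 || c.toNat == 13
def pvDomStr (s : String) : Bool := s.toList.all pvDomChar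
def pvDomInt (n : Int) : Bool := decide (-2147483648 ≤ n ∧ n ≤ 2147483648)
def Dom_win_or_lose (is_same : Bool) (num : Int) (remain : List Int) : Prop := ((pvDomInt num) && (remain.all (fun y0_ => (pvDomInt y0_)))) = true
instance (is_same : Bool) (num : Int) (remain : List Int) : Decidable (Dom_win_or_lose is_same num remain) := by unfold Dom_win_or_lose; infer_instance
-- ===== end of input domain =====

-- B replaces A's O(n^2) scan over all pairs by a single pass that pairs each
-- element against a running counter and a mod-10 residue histogram (O(n)).

-- ===== PORT A =====
-- itertools.combinations(remain, 2): all pairs (remain[a], remain[b]) with a < b, in order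
def pvCombos2 : List Int → List (Int × Int)
  | [] => []
  | x :: xs => xs.map (fun y => (x, y)) ++ pvCombos2 xs

def pvStepA (is_same : Bool) (num : Int) (wn : Int × Int) (p : Int × Int) : Int × Int :=
  if is_same then
    if p.1 ≠ p.2 then (wn.1 + 1, wn.2)
    else if p.1 < num then (wn.1 + 1, wn.2)
    else (wn.1, wn.2 + 1)
  else
    if p.1 = p.2 then (wn.1, wn.2 + 1)
    else if num ≤ PySem.Int.mod (p.1 + p.2) 10 then (wn.1, wn.2 + 1)
    else (wn.1 + 1, wn.2)

def win_or_lose (is_same : Bool) (num : Int) (remain : List Int) : Int × Int :=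
  (pvCombos2 remain).foldl (pvStepA is_same num) (0, 0)

-- ===== PORT B =====
-- B's loop state: win/not_win counters, value counter, mod-10 histogram, elements seen
structure PvB where
  win : Int
  notwin : Int
  cnt : PySem.Dict Int Int
  hist : List Int
  seen : Int
deriving Repr, DecidableEq

def pvStepB (is_same : Bool) (num : Int) (st : PvB) (y : Int) : PvB :=
  let c := st.cnt.getD y 0
  let r := PySem.Int.mod y 10      -- y % 10, always in [0, 10): hist indices are in range
  let wn : Int × Int :=
    if is_same then
      let w := st.win + (st.seen - c)
      if y < num then (w + c, st.notwin) else (w, st.notwin + c)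
    else
      let s := (PySem.List.pyRange 0 10 1).foldl
        (fun acc d => if num ≤ PySem.Int.mod (d + r) 10 then acc + PySem.List.pyGetD st.hist d 0 else acc) 0
      let bad := s - (if num ≤ PySem.Int.mod (2 * y) 10 then c else 0)
      (st.win + (st.seen - c) - bad, st.notwin + c + bad)
  ⟨wn.1, wn.2, st.cnt.insert y (c + 1),
    PySem.List.pySetD st.hist r (PySem.List.pyGetD st.hist r 0 + 1), st.seen + 1⟩

def win_or_lose_alt (is_same : Bool) (num : Int) (remain : List Int) : Int × Int :=
  let st := remain.foldl (pvStepB is_same num) ⟨0, 0, PySem.Dict.empty, List.replicate 10 0, 0⟩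
  (st.win, st.notwin)

-- ===== PRECONDITION & SPEC =====
def Spec_win_or_lose (is_same : Bool) (num : Int) (remain : List Int) (out : Int × Int) : Prop := out = win_or_lose_alt is_same num remain
instance (is_same : Bool) (num : Int) (remain : List Int) (out : Int × Int) : Decidable (Spec_win_or_lose is_same num remain out) := by unfold Spec_win_or_lose; infer_instance

-- ===== CLAIM (what is proved, stated in full; the proofs are below) =====
def Claim_equal_win_or_lose : Prop := ∀ (is_same : Bool) (num : Int) (remain : List Int), Dom_win_or_lose is_same num remain → Spec_win_or_lose is_same num remain (win_or_lose is_same num remain)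

-- ===== LEMMAS AND PROOFS =====

-- per-pair contribution of A's loop body to win (pvW) and not_win (pvNW)
def pvW (is_same : Bool) (num : Int) (p : Int × Int) : Int :=
  if is_same then (if p.1 ≠ p.2 then 1 else if p.1 < num then 1 else 0)
  else (if p.1 = p.2 then 0 else if num ≤ PySem.Int.mod (p.1 + p.2) 10 then 0 else 1)

def pvNW (is_same : Bool) (num : Int) (p : Int × Int) : Int :=
  if is_same then (if p.1 ≠ p.2 then 0 else if p.1 < num then 0 else 1)
  else (if p.1 = p.2 then 1 else if num ≤ PySem.Int.mod (p.1 + p.2) 10 then 1 else 0)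

lemma pvStepA_eq (is_same : Bool) (num : Int) (wn : Int × Int) (p : Int × Int) :
    pvStepA is_same num wn p = (wn.1 + pvW is_same num p, wn.2 + pvNW is_same num p) := by
  unfold pvStepA pvW pvNW
  split_ifs <;> simp

lemma foldA_eq (is_same : Bool) (num : Int) (l : List (Int × Int)) (a b : Int) :
    l.foldl (pvStepA is_same num) (a, b)
      = (a + (l.map (pvW is_same num)).sum, b + (l.map (pvNW is_same num)).sum) := by
  induction l generalizing a b with
  | nil => simp
  | cons p t ih =>
      simp only [List.foldl_cons, pvStepA_eq, ih, List.map_cons, List.sum_cons]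
      simp [add_assoc]

lemma combos2_snoc_sum (f : Int × Int → Int) (y : Int) (xs : List Int) :
    ((pvCombos2 (xs ++ [y])).map f).sum
      = ((pvCombos2 xs).map f).sum + (xs.map (fun x => f (x, y))).sum := by
  induction xs with
  | nil => simp [pvCombos2]
  | cons x t ih =>
      simp only [List.cons_append, pvCombos2, List.map_append, List.sum_append, ih,
        List.map_cons, List.sum_cons, List.map_map]
      simp
      omega

-- the mod-10 residue histogram of xs
def pvHist (xs : List Int) : List Int :=
  (List.range 10).map (fun d : Nat => (xs.countP (fun x => PySem.Int.mod x 10 == ((d : Nat) : Int)) : Int))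

-- cast a cons-step of countP to Int with its indicator
lemma countP_cons_int (p : Int → Bool) (x : Int) (t : List Int) :
    ((List.countP p (x :: t) : Nat) : Int)
      = (List.countP p t : Int) + (if p x then 1 else 0) := by
  rw [List.countP_cons]
  split_ifs <;> push_cast <;> omega

lemma pvMod_add (x y : Int) :
    PySem.Int.mod (x + y) 10 = PySem.Int.mod (PySem.Int.mod x 10 + PySem.Int.mod y 10) 10 := by
  rw [PySem.Int.mod_eq_emod_of_pos (by norm_num), PySem.Int.mod_eq_emod_of_pos (by norm_num),
      PySem.Int.mod_eq_emod_of_pos (by norm_num), PySem.Int.mod_eq_emod_of_pos (by norm_num),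
      Int.add_emod]

-- reading the histogram of xs at an in-range index d gives the residue count
lemma hist_read (xs : List Int) (d : Int) (h0 : 0 ≤ d) (h10 : d < 10) :
    PySem.List.pyGetD (pvHist xs) d 0
      = (xs.countP (fun x => PySem.Int.mod x 10 == d) : Int) := by
  have hlen : (pvHist xs).length = 10 := by simp [pvHist]
  have hd : ((d.toNat : Nat) : Int) = d := Int.toNat_of_nonneg h0
  rw [← hd, PySem.List.pyGetD_natCast]
  unfold pvHist
  rw [PySem.List.getD_map_range _ 10 d.toNat 0 (by omega)]

-- one element's contribution to the histogram sum is its (x+y)%10 >= num indicator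
lemma pv_single (num y x : Int) :
    ((PySem.List.pyRange 0 10 1).map (fun d =>
        if num ≤ PySem.Int.mod (d + PySem.Int.mod y 10) 10
        then (if PySem.Int.mod x 10 == d then (1 : Int) else 0) else 0)).sum
      = if num ≤ PySem.Int.mod (x + y) 10 then 1 else 0 := by
  have hr : PySem.List.pyRange 0 10 1 = [0,1,2,3,4,5,6,7,8,9] := by decide
  rw [hr, pvMod_add x y]
  have h0 := PySem.Int.mod_nonneg x (b := 10) (by norm_num)
  have h1 := PySem.Int.mod_lt x (b := 10) (by norm_num)
  interval_cases h : (PySem.Int.mod x 10) <;> simp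

lemma sum_ite_countP (num y : Int) (xs : List Int) :
    ((PySem.List.pyRange 0 10 1).map (fun d =>
        if num ≤ PySem.Int.mod (d + PySem.Int.mod y 10) 10
        then (xs.countP (fun x => PySem.Int.mod x 10 == d) : Int) else 0)).sum
      = (xs.countP (fun x => num ≤ PySem.Int.mod (x + y) 10) : Int) := by
  induction xs with
  | nil => simp
  | cons x t ih =>
      have hsplit : ∀ d : Int,
          (if num ≤ PySem.Int.mod (d + PySem.Int.mod y 10) 10
           then ((x :: t).countP (fun x => PySem.Int.mod x 10 == d) : Int) else 0)
            = (if num ≤ PySem.Int.mod (d + PySem.Int.mod y 10) 10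
               then (t.countP (fun x => PySem.Int.mod x 10 == d) : Int) else 0)
              + (if num ≤ PySem.Int.mod (d + PySem.Int.mod y 10) 10
                 then (if PySem.Int.mod x 10 == d then (1 : Int) else 0) else 0) := by
        intro d
        by_cases h : num ≤ PySem.Int.mod (d + PySem.Int.mod y 10) 10
        · rw [if_pos h, if_pos h, if_pos h]
          exact countP_cons_int _ x t
        · rw [if_neg h, if_neg h, if_neg h, add_zero]
      calc ((PySem.List.pyRange 0 10 1).map _).sum
          = ((PySem.List.pyRange 0 10 1).map (fun d =>
              (if num ≤ PySem.Int.mod (d + PySem.Int.mod y 10) 10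
               then (t.countP (fun x => PySem.Int.mod x 10 == d) : Int) else 0)
              + (if num ≤ PySem.Int.mod (d + PySem.Int.mod y 10) 10
                 then (if PySem.Int.mod x 10 == d then (1 : Int) else 0) else 0))).sum := by
            exact congrArg List.sum (List.map_congr_left (fun d _ => hsplit d))
        _ = ((x :: t).countP (fun x => num ≤ PySem.Int.mod (x + y) 10) : Int) := by
            rw [List.sum_map_add, ih, pv_single, List.countP_cons]
            simp only [decide_eq_true_eq]
            split_ifs <;> push_cast <;> omega

-- the streamed histogram sum counts exactly the x in xs with (x+y)%10 >= num
lemma hist_sum_eq (num y : Int) (xs : List Int) :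
    (PySem.List.pyRange 0 10 1).foldl
        (fun acc d => if num ≤ PySem.Int.mod (d + PySem.Int.mod y 10) 10
          then acc + PySem.List.pyGetD (pvHist xs) d 0 else acc) 0
      = (xs.countP (fun x => num ≤ PySem.Int.mod (x + y) 10) : Int) := by
  rw [PySem.List.foldl_congr_mem (PySem.List.pyRange 0 10 1) _
        (fun acc d => acc + (if num ≤ PySem.Int.mod (d + PySem.Int.mod y 10) 10
          then PySem.List.pyGetD (pvHist xs) d 0 else 0)) 0
        (by intro acc d _
            show _ = acc + if num ≤ PySem.Int.mod (d + PySem.Int.mod y 10) 10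
              then PySem.List.pyGetD (pvHist xs) d 0 else 0
            by_cases h : num ≤ PySem.Int.mod (d + PySem.Int.mod y 10) 10
            · rw [if_pos h, if_pos h]
            · rw [if_neg h, if_neg h, add_zero]),
      PySem.List.foldl_add, zero_add,
      List.map_congr_left (fun d hd => by
        have hb := (PySem.List.mem_pyRange_one).mp hd
        rw [hist_read xs d hb.1 hb.2]),
      sum_ite_countP]

lemma sumW_true (num y : Int) (xs : List Int) :
    (xs.map (fun x => pvW true num (x, y))).sum
      = ((xs.length : Int) - xs.count y) + (if y < num then (xs.count y : Int) else 0) := by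
  induction xs with
  | nil => simp
  | cons x t ih =>
      rw [List.map_cons, List.sum_cons, ih]
      by_cases hxy : x = y <;> by_cases hn : y < num <;>
        simp [pvW, hxy, hn, List.count_cons] <;> push_cast <;> omega

lemma sumNW_true (num y : Int) (xs : List Int) :
    (xs.map (fun x => pvNW true num (x, y))).sum
      = (if y < num then 0 else (xs.count y : Int)) := by
  induction xs with
  | nil => simp
  | cons x t ih =>
      rw [List.map_cons, List.sum_cons, ih]
      by_cases hxy : x = y <;> by_cases hn : y < num <;>
        simp [pvNW, hxy, hn, List.count_cons] <;> push_cast <;> omega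

lemma sumW_false (num y : Int) (xs : List Int) :
    (xs.map (fun x => pvW false num (x, y))).sum
      = ((xs.length : Int) - xs.count y)
        - ((xs.countP (fun x => num ≤ PySem.Int.mod (x + y) 10) : Int)
           - (if num ≤ PySem.Int.mod (2 * y) 10 then (xs.count y : Int) else 0)) := by
  induction xs with
  | nil => simp
  | cons x t ih =>
      have h2y : (2 : Int) * y = y + y := by ring
      rw [List.map_cons, List.sum_cons, ih]
      by_cases hxy : x = y <;> by_cases hm : num ≤ PySem.Int.mod (x + y) 10 <;>
        simp [pvW, hxy, hm, List.count_cons, List.countP_cons, h2y] <;>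
        push_cast <;> split_ifs <;> omega

lemma sumNW_false (num y : Int) (xs : List Int) :
    (xs.map (fun x => pvNW false num (x, y))).sum
      = (xs.count y : Int)
        + ((xs.countP (fun x => num ≤ PySem.Int.mod (x + y) 10) : Int)
           - (if num ≤ PySem.Int.mod (2 * y) 10 then (xs.count y : Int) else 0)) := by
  induction xs with
  | nil => simp
  | cons x t ih =>
      have h2y : (2 : Int) * y = y + y := by ring
      rw [List.map_cons, List.sum_cons, ih]
      by_cases hxy : x = y <;> by_cases hm : num ≤ PySem.Int.mod (x + y) 10 <;>
        simp [pvNW, hxy, hm, List.count_cons, List.countP_cons, h2y] <;>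
        push_cast <;> split_ifs <;> omega

lemma pvHist_snoc (xs : List Int) (y : Int) :
    PySem.List.pySetD (pvHist xs) (PySem.Int.mod y 10)
        (PySem.List.pyGetD (pvHist xs) (PySem.Int.mod y 10) 0 + 1)
      = pvHist (xs ++ [y]) := by
  have h0 := PySem.Int.mod_nonneg y (b := 10) (by norm_num)
  have h1 := PySem.Int.mod_lt y (b := 10) (by norm_num)
  have hlen : (pvHist xs).length = 10 := by simp [pvHist]
  have hlen' : (pvHist (xs ++ [y])).length = 10 := by simp [pvHist]
  have hr : (((PySem.Int.mod y 10).toNat : Nat) : Int) = PySem.Int.mod y 10 :=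
    Int.toNat_of_nonneg h0
  apply List.ext_getElem
  · rw [PySem.List.length_pySetD, hlen, hlen']
  · intro i hi1 hi2
    have hi : i < 10 := by rw [PySem.List.length_pySetD, hlen] at hi1; omega
    have e1 : ∀ (l : List Int) (hl : l.length = 10),
        l[i]'(by omega) = PySem.List.pyGetD l (i : Int) 0 := by
      intro l hl
      rw [PySem.List.pyGetD_eq_getElem l 0 (by omega) (by rw [hl]; exact_mod_cast hi)]
      simp
    rw [e1 _ (by rw [PySem.List.length_pySetD, hlen]), e1 _ hlen']
    rw [← hr, PySem.List.pyGetD_pySetD_natCast (pvHist xs) _ i _ 0 (by rw [hlen]; omega)]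
    rw [hist_read (xs ++ [y]) (i : Int) (by omega) (by exact_mod_cast hi)]
    by_cases hcase : i = (PySem.Int.mod y 10).toNat
    · subst hcase
      rw [if_pos rfl, hr, hist_read xs _ h0 h1]
      simp [List.countP_append, List.countP_cons]
    · rw [if_neg hcase, hist_read xs (i : Int) (by omega) (by exact_mod_cast hi)]
      have hne : PySem.Int.mod y 10 ≠ (i : Int) := by
        rw [← hr]
        intro hh
        exact hcase (by exact_mod_cast hh.symm)
      have hne' : ¬ y % 10 = (i : Int) := by
        rw [← PySem.Int.mod_eq_emod_of_pos (by norm_num : (0 : Int) < 10)]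
        exact hne
      simp [List.countP_append, hne']

-- the whole-loop invariant of B: after folding xs the state holds A's pair
-- totals over xs, the counter of xs, the residue histogram of xs, and |xs|
lemma B_foldl_eq (is_same : Bool) (num : Int) (xs : List Int) :
    xs.foldl (pvStepB is_same num) ⟨0, 0, PySem.Dict.empty, List.replicate 10 0, 0⟩
      = ⟨((pvCombos2 xs).map (pvW is_same num)).sum,
         ((pvCombos2 xs).map (pvNW is_same num)).sum,
         xs.foldl (fun d x => d.insert x (d.getD x 0 + 1)) PySem.Dict.empty,
         pvHist xs,
         (xs.length : Int)⟩ := by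
  induction xs using List.reverseRecOn with
  | nil => rfl
  | append_singleton t y ih =>
      rw [List.foldl_append, List.foldl_append, ih]
      have hc : (t.foldl (fun d x => d.insert x (d.getD x 0 + 1)) PySem.Dict.empty).getD y 0
          = (t.count y : Int) := by
        rw [PySem.Dict.getD_foldl_insert_add_one, PySem.Dict.getD_empty, zero_add]
      simp only [List.foldl_cons, List.foldl_nil, pvStepB, hc]
      cases is_same
      · simp only [Bool.false_eq_true, if_false, hist_sum_eq, pvHist_snoc]
        rw [PvB.mk.injEq]
        refine ⟨?_, ?_, rfl, rfl, by rw [List.length_append, List.length_singleton]; push_cast; ring⟩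
        · rw [combos2_snoc_sum, sumW_false]; push_cast; ring
        · rw [combos2_snoc_sum, sumNW_false]; push_cast; ring
      · simp only [if_true, pvHist_snoc]
        by_cases hn : y < num
        · rw [if_pos hn, PvB.mk.injEq]
          refine ⟨?_, ?_, rfl, rfl, by rw [List.length_append, List.length_singleton]; push_cast; ring⟩
          · rw [combos2_snoc_sum, sumW_true, if_pos hn]; ring
          · rw [combos2_snoc_sum, sumNW_true, if_pos hn]; ring
        · rw [if_neg hn, PvB.mk.injEq]
          refine ⟨?_, ?_, rfl, rfl, by rw [List.length_append, List.length_singleton]; push_cast; ring⟩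
          · rw [combos2_snoc_sum, sumW_true, if_neg hn]; ring
          · rw [combos2_snoc_sum, sumNW_true, if_neg hn]

-- ===== VERDICT (by name: the statement is the Claim_ definition above) =====
theorem win_or_lose_spec : Claim_equal_win_or_lose := by
  intro is_same num remain _
  show _ = _
  rw [win_or_lose, win_or_lose_alt, foldA_eq, B_foldl_eq]
  simp
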